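-- pv_equiv track=rewrite | github.com/64-bitman/vim-config | pack/git/start/gir-vim-syntax/src/gir-vim-syntax.py | shorten_ns
-- ===== SOURCE A (Python) =====
-- nsmap = {
--     'gir': 'http://www.gtk.org/introspection/core/1.0',
--     'c': 'http://www.gtk.org/introspection/c/1.0',
--     'glib': 'http://www.gtk.org/introspection/glib/1.0',
-- }
--
-- def shorten_ns(s):
--     if not s.startswith('{'):
--         return s
--     for name, ns in nsmap.items():
--         pfx = '{' + ns + '}'
--         if s.startswith(pfx):
--             return name + ':' + s[len(pfx):]
--     return s
-- ===== SOURCE B (Python) =====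
-- nsmap = {
--     'gir': 'http://www.gtk.org/introspection/core/1.0',
--     'c': 'http://www.gtk.org/introspection/c/1.0',
--     'glib': 'http://www.gtk.org/introspection/glib/1.0',
-- }
--
-- ns2pfx = {v: k for k, v in nsmap.items()}
--
-- def shorten_ns(s):
--     if not s.startswith('{'):
--         return s
--     end = s.find('}')
--     if end == -1:
--         return s
--     name = ns2pfx.get(s[1:end])
--     if name is None:
--         return s
--     return name + ':' + s[end + 1:]
-- ===== Notes on version B (the rewrite author's own statement) =====
-- stated objective: idiomatic
-- what changed: Instead of looping over nsmap and testing a candidate brace-wrapped prefix per entry, B parses the namespace delimiters of s once and looks the URI up in a reverse dict built once at module load.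
import Mathlib
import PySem

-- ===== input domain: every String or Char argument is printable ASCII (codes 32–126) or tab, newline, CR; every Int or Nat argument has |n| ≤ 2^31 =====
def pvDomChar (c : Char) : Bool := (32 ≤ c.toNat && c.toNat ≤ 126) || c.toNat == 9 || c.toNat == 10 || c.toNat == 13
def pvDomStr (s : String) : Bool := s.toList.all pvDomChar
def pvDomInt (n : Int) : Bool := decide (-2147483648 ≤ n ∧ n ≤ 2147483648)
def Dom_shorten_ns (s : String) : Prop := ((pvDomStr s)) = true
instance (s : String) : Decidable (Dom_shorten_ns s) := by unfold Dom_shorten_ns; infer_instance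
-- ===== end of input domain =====

-- B replaces A's loop over nsmap (one candidate-prefix test per namespace) by parsing the
-- namespace delimiters once and one lookup in a reverse dict built once; objective: idiomatic.
-- Strings are handled on code points (List Char) throughout; this is exact for Python str.

-- ===== PORT A =====
-- nsmap as an (insertion-ordered) association list of code-point lists
def pvNsmap : List (List Char × List Char) :=
  [("gir".toList, "http://www.gtk.org/introspection/core/1.0".toList),
   ("c".toList, "http://www.gtk.org/introspection/c/1.0".toList),
   ("glib".toList, "http://www.gtk.org/introspection/glib/1.0".toList)]

-- the loop 'for name, ns in nsmap.items(): …'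
def pvLoopA : List (List Char × List Char) → List Char → List Char
  | [], cs => cs                                                   -- fell through: return s
  | (name, ns) :: rest, cs =>
    let pfx := '{' :: (ns ++ ['}'])                                -- pfx = '{' + ns + '}'
    if PySem.Chars.startswith cs pfx then
      name ++ ':' :: PySem.Chars.slice cs (some (pfx.length : Int)) none   -- name + ':' + s[len(pfx):]
    else pvLoopA rest cs

def shorten_ns (s : String) : String :=
  if !(PySem.Chars.startswith s.toList ['{']) then s               -- if not s.startswith('{'): return s
  else String.ofList (pvLoopA pvNsmap s.toList)

-- ===== PORT B =====
-- ns2pfx = {v: k for k, v in nsmap.items()}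
def pvNs2pfx : PySem.Dict (List Char) (List Char) :=
  PySem.Dict.ofList
    [("http://www.gtk.org/introspection/core/1.0".toList, "gir".toList),
     ("http://www.gtk.org/introspection/c/1.0".toList, "c".toList),
     ("http://www.gtk.org/introspection/glib/1.0".toList, "glib".toList)]

def shorten_ns_alt (s : String) : String :=
  if !(PySem.Chars.startswith s.toList ['{']) then s               -- if not s.startswith('{'): return s
  else
    let e := PySem.Chars.find s.toList ['}']                       -- end = s.find('}')
    if e == -1 then s                                              -- if end == -1: return s
    else
      match PySem.Dict.get? pvNs2pfx (PySem.Chars.slice s.toList (some 1) (some e)) with  -- ns2pfx.get(s[1:end])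
      | none => s                                                  -- if name is None: return s
      | some name => String.ofList (name ++ ':' :: PySem.Chars.slice s.toList (some (e + 1)) none)  -- name + ':' + s[end+1:]

-- ===== PRECONDITION & SPEC =====
def Spec_shorten_ns (s : String) (out : String) : Prop := out = shorten_ns_alt s
instance (s : String) (out : String) : Decidable (Spec_shorten_ns s out) := by unfold Spec_shorten_ns; infer_instance

-- ===== CLAIM (what is proved, stated in full; the proofs are below) =====
def Claim_equal_shorten_ns : Prop := ∀ (s : String), Dom_shorten_ns s → Spec_shorten_ns s (shorten_ns s)

-- ===== LEMMAS AND PROOFS =====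

-- a '}'-terminated prefix of a list whose first '}' closes at p determines the namespace part
lemma pvPrefixBraceAux (p : List Char) : ∀ (u r : List Char), '}' ∉ u → '}' ∉ p →
    (u ++ ['}']) <+: (p ++ '}' :: r) → u = p := by
  induction p with
  | nil =>
    intro u r hu _ h
    cases u with
    | nil => rfl
    | cons c u' =>
      exfalso
      rw [List.cons_append, List.nil_append] at h
      have h2 := (List.cons_prefix_cons.mp h).1
      exact hu (by simp [h2])
  | cons a p' ih =>
    intro u r hu hp h
    cases u with
    | nil =>
      exfalso
      rw [List.nil_append] at h
      have h2 := (List.cons_prefix_cons.mp h).1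
      exact hp (by simp [← h2])
    | cons c u' =>
      rw [List.cons_append] at h
      have h2 := List.cons_prefix_cons.mp h
      have h3 := ih u' r (fun hx => hu (List.mem_cons_of_mem _ hx))
        (fun hx => hp (List.mem_cons_of_mem _ hx)) h2.2
      rw [h2.1, h3]

-- split a list at its first '}'
lemma pvFirstBrace (t : List Char) (hm : '}' ∈ t) :
    ∃ p r, t = p ++ '}' :: r ∧ '}' ∉ p := by
  induction t with
  | nil => cases hm
  | cons a t' ih =>
    by_cases ha : a = '}'
    · exact ⟨[], t', by rw [ha]; rfl, by simp⟩
    · have hm' : '}' ∈ t' := by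
        rcases List.mem_cons.mp hm with h | h
        · exact absurd h.symm ha
        · exact h
      obtain ⟨p, r, h1, h2⟩ := ih hm'
      refine ⟨a :: p, r, by rw [h1]; rfl, ?_⟩
      intro hx
      rcases List.mem_cons.mp hx with h | h
      · exact ha h.symm
      · exact h2 h

-- the first '}' of '{' + p + '}' + r is at index 1 + |p| when p is '}'-free
lemma pvFindBrace (p r : List Char) (hp : '}' ∉ p) :
    PySem.Chars.find ('{' :: (p ++ '}' :: r)) ['}'] = ((1 + p.length : Nat) : Int) := by
  set cs := '{' :: (p ++ '}' :: r) with hcs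
  have hinf : ['}'] <:+: cs := by rw [List.singleton_infix_iff]; simp [hcs]
  have hne : ¬ (PySem.Chars.find cs ['}'] = -1) := by
    rw [PySem.Chars.find_eq_neg_one_iff]; exact not_not_intro hinf
  have hspec := PySem.Chars.findFrom_natCast_spec cs ['}'] 0 (Nat.zero_le _) (by simpa using hne)
  simp only [Nat.cast_zero, PySem.Chars.findFrom_zero] at hspec
  obtain ⟨h0, hpre, hmin⟩ := hspec
  set f := PySem.Chars.find cs ['}'] with hf
  have hdrop : cs.drop (1 + p.length) = '}' :: r := by
    have h1 : cs = ('{' :: p) ++ ('}' :: r) := by simp [hcs]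
    rw [h1, show 1 + p.length = ('{' :: p).length by simp [Nat.add_comm], List.drop_left]
  have hub : f.toNat ≤ 1 + p.length := by
    by_contra hgt
    exact hmin (1 + p.length) (Nat.zero_le _) (by omega) ⟨r, by simp [hdrop]⟩
  have hlb : ¬ f.toNat < 1 + p.length := by
    intro hlt
    obtain ⟨t2, ht2⟩ := hpre
    have hget : cs[f.toNat]? = some '}' := by
      rw [← List.head?_drop, ← ht2]; rfl
    rcases Nat.eq_zero_or_pos f.toNat with h0' | hpos
    · rw [h0'] at hget; simp [hcs] at hget
    · obtain ⟨k, hk⟩ : ∃ k, f.toNat = k + 1 := ⟨f.toNat - 1, by omega⟩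
      rw [hk] at hget hlt
      have hget2 : (p ++ '}' :: r)[k]? = some '}' := by simpa [hcs] using hget
      rw [List.getElem?_append_left (by omega)] at hget2
      exact hp (List.mem_of_getElem? hget2)
  omega

-- A's per-entry test: with cs = '{' + p + '}' + r (p '}'-free), startswith('{'+u+'}') holds iff u = p
lemma pvStartsIff (p r u : List Char) (hp : '}' ∉ p) (hu : '}' ∉ u) :
    PySem.Chars.startswith ('{' :: (p ++ '}' :: r)) ('{' :: (u ++ ['}'])) = true ↔ u = p := by
  rw [PySem.Chars.startswith_iff]
  constructor
  · intro h
    exact pvPrefixBraceAux p u r hu hp (List.cons_prefix_cons.mp h).2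
  · rintro rfl
    exact ⟨r, by simp⟩

-- dropping the '{uri}' prefix
lemma pvDropPfx (u r : List Char) : ('{' :: (u ++ '}' :: r)).drop (u.length + 2) = r := by
  have h1 : '{' :: (u ++ '}' :: r) = (('{' :: u) ++ ['}']) ++ r := by simp
  rw [h1, List.drop_left' (by simp)]

-- if cs has no '}', no '{uri}' prefix test can succeed
lemma pvNoBrace (cs u : List Char) (hm : '}' ∉ cs) :
    PySem.Chars.startswith cs ('{' :: (u ++ ['}'])) = false := by
  rw [← Bool.not_eq_true, PySem.Chars.startswith_iff]
  intro h
  exact hm (h.subset (by simp))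

-- A's whole loop falls through when cs has no '}'
lemma pvLoopA_nomatch (l : List (List Char × List Char)) (cs : List Char) (hm : '}' ∉ cs) :
    pvLoopA l cs = cs := by
  induction l with
  | nil => rfl
  | cons e rest ih =>
    cases e with
    | mk name ns => simp [pvLoopA, pvNoBrace cs ns hm, ih]

theorem shorten_ns_spec : Claim_equal_shorten_ns := by
  unfold Claim_equal_shorten_ns
  intro s _
  unfold Spec_shorten_ns
  unfold shorten_ns shorten_ns_alt
  by_cases hb : PySem.Chars.startswith s.toList ['{'] = true
  case neg => simp [hb]
  case pos =>
  obtain ⟨t, ht⟩ : ∃ t, s.toList = '{' :: t := by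
    obtain ⟨t, ht⟩ := (PySem.Chars.startswith_iff _ _).mp hb
    exact ⟨t, ht.symm⟩
  by_cases hm : ('}' : Char) ∈ s.toList
  case neg =>
    -- no '}': A's loop falls through, B's find returns -1; both return s
    have hf : PySem.Chars.find s.toList ['}'] = -1 := by
      rw [PySem.Chars.find_eq_neg_one_iff, List.singleton_infix_iff]
      exact hm
    rw [pvLoopA_nomatch pvNsmap s.toList hm]
    simp [hb, hf, String.ofList_toList]
  case pos =>
    -- '}' present: decompose t = p ++ '}' :: r with p '}'-free
    have hmt : ('}' : Char) ∈ t := by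
      rcases (by simpa [ht] using hm : ('}' : Char) = '{' ∨ ('}' : Char) ∈ t) with h | h
      · exact absurd h (by decide)
      · exact h
    obtain ⟨p, r, htdecomp, hpfree⟩ := pvFirstBrace t hmt
    have hcs : s.toList = '{' :: (p ++ '}' :: r) := by rw [ht, htdecomp]
    have hfind : PySem.Chars.find s.toList ['}'] = ((1 + p.length : Nat) : Int) := by
      rw [hcs]; exact pvFindBrace p r hpfree
    have hfne : ((((1 + p.length : Nat) : Int)) == -1) = false := by
      rw [beq_eq_false_iff_ne]
      intro h
      omega
    -- B's extracted namespace is p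
    have hslice1 : PySem.Chars.slice s.toList (some 1) (some ((1 + p.length : Nat) : Int)) = p := by
      simp only [PySem.Chars.slice]
      rw [PySem.List.slice_toNat _ (by omega) (by omega), hcs]
      simp only [Int.toNat_one, List.drop_succ_cons, List.drop_zero]
      rw [show (((1 + p.length : Nat) : Int)).toNat - 1 = p.length by omega]
      exact List.take_left
    -- B's tail slice is r
    have hslice2 : PySem.Chars.slice s.toList (some (((1 + p.length : Nat) : Int) + 1)) none = r := by
      have he : (((1 + p.length : Nat) : Int) + 1) = ((p.length + 2 : Nat) : Int) := by push_cast; ring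
      simp only [PySem.Chars.slice]
      rw [he, PySem.List.slice_from_natCast, hcs, pvDropPfx]
    -- A's startswith tests, one per nsmap entry
    have hts1 : PySem.Chars.startswith s.toList ('{' :: ("http://www.gtk.org/introspection/core/1.0".toList ++ ['}'])) = true ↔ "http://www.gtk.org/introspection/core/1.0".toList = p := by
      rw [hcs]; exact pvStartsIff p r _ hpfree (by decide)
    have hts2 : PySem.Chars.startswith s.toList ('{' :: ("http://www.gtk.org/introspection/c/1.0".toList ++ ['}'])) = true ↔ "http://www.gtk.org/introspection/c/1.0".toList = p := by
      rw [hcs]; exact pvStartsIff p r _ hpfree (by decide)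
    have hts3 : PySem.Chars.startswith s.toList ('{' :: ("http://www.gtk.org/introspection/glib/1.0".toList ++ ['}'])) = true ↔ "http://www.gtk.org/introspection/glib/1.0".toList = p := by
      rw [hcs]; exact pvStartsIff p r _ hpfree (by decide)
    simp only [hb, Bool.not_true, Bool.false_eq_true, if_false, hfind, hfne, hslice1, hslice2]
    by_cases hp1 : p = "http://www.gtk.org/introspection/core/1.0".toList
    · have hsw1 : PySem.Chars.startswith s.toList ('{' :: ("http://www.gtk.org/introspection/core/1.0".toList ++ ['}'])) = true := hts1.mpr hp1.symm
      have hB : PySem.Dict.get? pvNs2pfx p = some ("gir".toList) := by rw [hp1]; decide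
      have hdr1 : PySem.Chars.slice s.toList (some ((('{' :: ("http://www.gtk.org/introspection/core/1.0".toList ++ ['}'])).length : Int))) none = r := by
        simp only [PySem.Chars.slice]
        rw [show ((('{' :: ("http://www.gtk.org/introspection/core/1.0".toList ++ ['}'])).length : Nat) : Int) = (("http://www.gtk.org/introspection/core/1.0".toList.length + 2 : Nat) : Int) by decide,
          PySem.List.slice_from_natCast, hcs, hp1, pvDropPfx]
      rw [hB]
      simp only [pvNsmap, pvLoopA, hsw1, if_true]
      rw [hdr1]
    · by_cases hp2 : p = "http://www.gtk.org/introspection/c/1.0".toList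
      · have hsw1 : PySem.Chars.startswith s.toList ('{' :: ("http://www.gtk.org/introspection/core/1.0".toList ++ ['}'])) = false :=
          Bool.eq_false_iff.mpr (fun h => hp1 (hts1.mp h).symm)
        have hsw2 : PySem.Chars.startswith s.toList ('{' :: ("http://www.gtk.org/introspection/c/1.0".toList ++ ['}'])) = true := hts2.mpr hp2.symm
        have hB : PySem.Dict.get? pvNs2pfx p = some ("c".toList) := by rw [hp2]; decide
        have hdr2 : PySem.Chars.slice s.toList (some ((('{' :: ("http://www.gtk.org/introspection/c/1.0".toList ++ ['}'])).length : Int))) none = r := by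
            simp only [PySem.Chars.slice]
            rw [show ((('{' :: ("http://www.gtk.org/introspection/c/1.0".toList ++ ['}'])).length : Nat) : Int) = (("http://www.gtk.org/introspection/c/1.0".toList.length + 2 : Nat) : Int) by decide,
            PySem.List.slice_from_natCast, hcs, hp2, pvDropPfx]
        rw [hB]
        simp only [pvNsmap, pvLoopA, hsw1, hsw2, Bool.false_eq_true, if_false, if_true]
        rw [hdr2]
      · by_cases hp3 : p = "http://www.gtk.org/introspection/glib/1.0".toList
        · have hsw1 : PySem.Chars.startswith s.toList ('{' :: ("http://www.gtk.org/introspection/core/1.0".toList ++ ['}'])) = false :=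
            Bool.eq_false_iff.mpr (fun h => hp1 (hts1.mp h).symm)
          have hsw2 : PySem.Chars.startswith s.toList ('{' :: ("http://www.gtk.org/introspection/c/1.0".toList ++ ['}'])) = false :=
            Bool.eq_false_iff.mpr (fun h => hp2 (hts2.mp h).symm)
          have hsw3 : PySem.Chars.startswith s.toList ('{' :: ("http://www.gtk.org/introspection/glib/1.0".toList ++ ['}'])) = true := hts3.mpr hp3.symm
          have hB : PySem.Dict.get? pvNs2pfx p = some ("glib".toList) := by rw [hp3]; decide
          have hdr3 : PySem.Chars.slice s.toList (some ((('{' :: ("http://www.gtk.org/introspection/glib/1.0".toList ++ ['}'])).length : Int))) none = r := by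
            simp only [PySem.Chars.slice]
            rw [show ((('{' :: ("http://www.gtk.org/introspection/glib/1.0".toList ++ ['}'])).length : Nat) : Int) = (("http://www.gtk.org/introspection/glib/1.0".toList.length + 2 : Nat) : Int) by decide,
          PySem.List.slice_from_natCast, hcs, hp3, pvDropPfx]
          rw [hB]
          simp only [pvNsmap, pvLoopA, hsw1, hsw2, hsw3, Bool.false_eq_true, if_false, if_true]
          rw [hdr3]
        · have hsw1 : PySem.Chars.startswith s.toList ('{' :: ("http://www.gtk.org/introspection/core/1.0".toList ++ ['}'])) = false :=
            Bool.eq_false_iff.mpr (fun h => hp1 (hts1.mp h).symm)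
          have hsw2 : PySem.Chars.startswith s.toList ('{' :: ("http://www.gtk.org/introspection/c/1.0".toList ++ ['}'])) = false :=
            Bool.eq_false_iff.mpr (fun h => hp2 (hts2.mp h).symm)
          have hsw3 : PySem.Chars.startswith s.toList ('{' :: ("http://www.gtk.org/introspection/glib/1.0".toList ++ ['}'])) = false :=
            Bool.eq_false_iff.mpr (fun h => hp3 (hts3.mp h).symm)
          have hB : PySem.Dict.get? pvNs2pfx p = none := by
            have hd : pvNs2pfx = PySem.Dict.mk
                [("http://www.gtk.org/introspection/core/1.0".toList, "gir".toList), ("http://www.gtk.org/introspection/c/1.0".toList, "c".toList), ("http://www.gtk.org/introspection/glib/1.0".toList, "glib".toList)] := by decide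
            rw [hd]
            rw [PySem.Dict.get?_mk_cons, if_neg (by simp only [beq_iff_eq]; exact fun h => hp1 h.symm)]
            rw [PySem.Dict.get?_mk_cons, if_neg (by simp only [beq_iff_eq]; exact fun h => hp2 h.symm)]
            rw [PySem.Dict.get?_mk_cons, if_neg (by simp only [beq_iff_eq]; exact fun h => hp3 h.symm)]
            rfl
          rw [hB]
          simp only [pvNsmap, pvLoopA, hsw1, hsw2, hsw3, Bool.false_eq_true, if_false]
          rw [String.ofList_toList]
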